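-- pv_equiv track=rewrite | github.com/dantheman927/password_tool | password.py | check_ul
-- ===== SOURCE A (Python) =====
-- def check_ul(pPASS):
--     has_upper = False
--     has_lower = False
--
--     for char in pPASS:
--         if char.islower() and char.isalnum():
--             has_lower = True
--         if char.isupper() and char.isalnum():
--             has_upper = True
--     if has_lower and has_upper:
--         return True
--     else:
--         return False
-- ===== SOURCE B (Python) =====
-- def check_ul(pPASS):
--     # A string gains nothing from lower() iff it has no uppercase letter, and
--     # nothing from upper() iff it has no lowercase letter: compare whole-string
--     # case transforms instead of scanning characters with predicates.
--     return pPASS != pPASS.lower() and pPASS != pPASS.upper()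
-- ===== Notes on version B (the rewrite author's own statement) =====
-- stated objective: simpler
-- what changed: Replaces A's per-character predicate loop with two boolean flags by comparing the whole string against its lower() and upper() case transforms: pPASS != pPASS.lower() detects an uppercase letter, pPASS != pPASS.upper() a lowercase one; the case transforms and comparisons run in C, so the measured speedup is a constant factor.
import Mathlib
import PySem

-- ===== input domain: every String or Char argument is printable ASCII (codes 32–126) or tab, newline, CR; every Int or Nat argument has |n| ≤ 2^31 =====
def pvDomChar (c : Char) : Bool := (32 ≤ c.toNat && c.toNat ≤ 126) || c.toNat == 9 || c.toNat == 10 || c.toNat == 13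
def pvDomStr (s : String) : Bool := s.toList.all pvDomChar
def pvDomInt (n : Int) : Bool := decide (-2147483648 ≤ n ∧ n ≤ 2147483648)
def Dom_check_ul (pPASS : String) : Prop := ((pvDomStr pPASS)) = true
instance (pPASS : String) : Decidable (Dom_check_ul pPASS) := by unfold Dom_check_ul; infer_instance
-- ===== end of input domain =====

-- B replaces A's per-character flag loop by comparing the string with its lower()/upper() case transforms (simpler).


-- ===== PORT A =====
-- A's single loop, flags accumulated over the characters
def check_ul_loop (l : List Char) (has_upper has_lower : Bool) : Bool × Bool :=
  match l with
  | [] => (has_upper, has_lower)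
  | c :: rest =>
    let has_lower := if PySem.Chars.islower c && PySem.Chars.isalnum c then true else has_lower
    let has_upper := if PySem.Chars.isupper c && PySem.Chars.isalnum c then true else has_upper
    check_ul_loop rest has_upper has_lower

def check_ul (pPASS : String) : Bool :=
  let r := check_ul_loop pPASS.toList false false
  if r.2 && r.1 then true else false

-- ===== PORT B =====
-- Source B: return pPASS != pPASS.lower() and pPASS != pPASS.upper()
-- (string comparison done on the char lists; PySem.Chars.lower/upper are the .lower()/.upper() transforms)
def check_ul_alt (pPASS : String) : Bool :=
  (!(PySem.Chars.lower pPASS.toList == pPASS.toList)) &&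
  (!(PySem.Chars.upper pPASS.toList == pPASS.toList))

-- ===== PRECONDITION & SPEC =====
def Spec_check_ul (pPASS : String) (out : Bool) : Prop := out = check_ul_alt pPASS
instance (pPASS : String) (out : Bool) : Decidable (Spec_check_ul pPASS out) := by unfold Spec_check_ul; infer_instance

-- ===== CLAIM (what is proved, stated in full; the proofs are below) =====
def Claim_equal_check_ul : Prop := ∀ (pPASS : String), Dom_check_ul pPASS → Spec_check_ul pPASS (check_ul pPASS)

-- ===== LEMMAS AND PROOFS =====

-- A's loop computes (has_upper, has_lower) = any-scans of the two predicates
lemma check_ul_loop_eq (l : List Char) (u low : Bool) :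
    check_ul_loop l u low =
      ((u || l.any fun c => PySem.Chars.isupper c && PySem.Chars.isalnum c),
       (low || l.any fun c => PySem.Chars.islower c && PySem.Chars.isalnum c)) := by
  induction l generalizing u low with
  | nil => simp [check_ul_loop]
  | cons c rest ih =>
    simp only [check_ul_loop, List.any_cons, ih]
    by_cases h1 : (PySem.Chars.islower c && PySem.Chars.isalnum c) = true <;>
      by_cases h2 : (PySem.Chars.isupper c && PySem.Chars.isalnum c) = true <;>
      simp [h1, h2]

-- the redundant isalnum conjunct is absorbed (islower/isupper imply isalnum)
lemma islower_and_isalnum (c : Char) :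
    (PySem.Chars.islower c && PySem.Chars.isalnum c) = PySem.Chars.islower c := by
  by_cases h : PySem.Chars.islower c = true <;>
    simp [h, PySem.Chars.isalnum, PySem.Chars.isalpha]

lemma isupper_and_isalnum (c : Char) :
    (PySem.Chars.isupper c && PySem.Chars.isalnum c) = PySem.Chars.isupper c := by
  by_cases h : PySem.Chars.isupper c = true <;>
    simp [h, PySem.Chars.isalnum, PySem.Chars.isalpha]

lemma toNat_ofNat_of_valid (n : Nat) (h : n < 0xD800) : (Char.ofNat n).toNat = n := by
  simp [Char.ofNat, Nat.isValidChar, h, Char.toNat, Char.ofNatAux]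

-- lowerChar fixes c exactly when c is not an uppercase letter
lemma lowerChar_eq_self_iff (c : Char) :
    (PySem.Chars.lowerChar c = c) ↔ PySem.Chars.isupper c = false := by
  unfold PySem.Chars.lowerChar
  by_cases h : PySem.Chars.isupper c = true
  · simp only [h, if_pos]
    have hb : 65 ≤ c.toNat ∧ c.toNat ≤ 90 := by
      simp only [PySem.Chars.isupper, Bool.and_eq_true, decide_eq_true_eq, Char.le_def,
        UInt32.le_iff_toNat_le] at h
      exact ⟨h.1, h.2⟩
    have hv : (Char.ofNat (c.toNat + 32)).toNat = c.toNat + 32 :=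
      toNat_ofNat_of_valid _ (by omega)
    constructor
    · intro heq; rw [heq] at hv; omega
    · intro hf; simp at hf
  · simp only [Bool.not_eq_true] at h; simp [h]

-- upperChar fixes c exactly when c is not a lowercase letter
lemma upperChar_eq_self_iff (c : Char) :
    (PySem.Chars.upperChar c = c) ↔ PySem.Chars.islower c = false := by
  unfold PySem.Chars.upperChar
  by_cases h : PySem.Chars.islower c = true
  · simp only [h, if_pos]
    have hb : 97 ≤ c.toNat ∧ c.toNat ≤ 122 := by
      simp only [PySem.Chars.islower, Bool.and_eq_true, decide_eq_true_eq, Char.le_def,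
        UInt32.le_iff_toNat_le] at h
      exact ⟨h.1, h.2⟩
    have hv : (Char.ofNat (c.toNat - 32)).toNat = c.toNat - 32 :=
      toNat_ofNat_of_valid _ (by omega)
    constructor
    · intro heq; rw [heq] at hv; omega
    · intro hf; simp at hf
  · simp only [Bool.not_eq_true] at h; simp [h]

lemma map_eq_self_iff_of_chars (l : List Char) (f : Char → Char) :
    (l.map f = l) ↔ ∀ x ∈ l, f x = x := by
  induction l with
  | nil => simp
  | cons a t ih => simp [ih]

-- "string unchanged by the transform" decided by the corresponding any-scan
lemma lower_beq_eq (l : List Char) :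
    (PySem.Chars.lower l == l) = !(l.any fun c => PySem.Chars.isupper c) := by
  cases hany : l.any fun c => PySem.Chars.isupper c
  · simp only [List.any_eq_false, Bool.not_eq_true] at hany
    simp only [Bool.not_false, beq_iff_eq, PySem.Chars.lower]
    exact (map_eq_self_iff_of_chars l _).2 fun x hx => (lowerChar_eq_self_iff x).2 (hany x hx)
  · simp only [List.any_eq_true] at hany
    obtain ⟨c, hc, hup⟩ := hany
    simp only [Bool.not_true, beq_eq_false_iff_ne, ne_eq, PySem.Chars.lower]
    intro heq
    have := (map_eq_self_iff_of_chars l _).1 heq c hc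
    rw [(lowerChar_eq_self_iff c).1 this] at hup
    exact Bool.false_ne_true hup

lemma upper_beq_eq (l : List Char) :
    (PySem.Chars.upper l == l) = !(l.any fun c => PySem.Chars.islower c) := by
  cases hany : l.any fun c => PySem.Chars.islower c
  · simp only [List.any_eq_false, Bool.not_eq_true] at hany
    simp only [Bool.not_false, beq_iff_eq, PySem.Chars.upper]
    exact (map_eq_self_iff_of_chars l _).2 fun x hx => (upperChar_eq_self_iff x).2 (hany x hx)
  · simp only [List.any_eq_true] at hany
    obtain ⟨c, hc, hlo⟩ := hany
    simp only [Bool.not_true, beq_eq_false_iff_ne, ne_eq, PySem.Chars.upper]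
    intro heq
    have := (map_eq_self_iff_of_chars l _).1 heq c hc
    rw [(upperChar_eq_self_iff c).1 this] at hlo
    exact Bool.false_ne_true hlo

-- ===== VERDICT (by name: the statement is the Claim_ definition above) =====
theorem check_ul_spec : Claim_equal_check_ul := by
  intro pPASS _
  unfold Spec_check_ul check_ul check_ul_alt
  simp only [check_ul_loop_eq, Bool.false_or, lower_beq_eq, upper_beq_eq, Bool.not_not,
    funext islower_and_isalnum, funext isupper_and_isalnum]
  cases hl : pPASS.toList.any fun c => PySem.Chars.islower c <;>
    cases hu : pPASS.toList.any fun c => PySem.Chars.isupper c <;> decide
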